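-- pv_equiv track=rewrite | github.com/AngelicaDiazB14/CLASESP. | clase 1 intro.py | sumarDigitosMayores4
-- ===== SOURCE A (Python) =====
-- def sumarDigitosMayores4(n):
--     if(isinstance(n,int) and n >= 0):
--         if(n == 0):
--             return 0
--         else:
--             if(n%10 > 4):
--                 return (n%10)+ sumarDigitosMayores4( n//10,)
--             else:
--                 return sumarDigitosMayores4( n//10)
--     else:
--         return "Error: en número debe ser entero positivo"
-- ===== SOURCE B (Python) =====
-- def sumarDigitosMayores4(n):
--     if isinstance(n, int) and n >= 0:
--         total = 0
--         while n > 0: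
--             d = n % 10
--             if d > 4:
--                 total += d
--             n //= 10
--         return total
--     else:
--         return "Error: en número debe ser entero positivo"
-- ===== Notes on version B (the rewrite author's own statement) =====
-- stated objective: idiomatic
-- what changed: Replaces the non-tail recursion over the digits with an iterative while-loop that keeps a running total (an accumulator), keeping the same guard and error string.
import Mathlib
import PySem

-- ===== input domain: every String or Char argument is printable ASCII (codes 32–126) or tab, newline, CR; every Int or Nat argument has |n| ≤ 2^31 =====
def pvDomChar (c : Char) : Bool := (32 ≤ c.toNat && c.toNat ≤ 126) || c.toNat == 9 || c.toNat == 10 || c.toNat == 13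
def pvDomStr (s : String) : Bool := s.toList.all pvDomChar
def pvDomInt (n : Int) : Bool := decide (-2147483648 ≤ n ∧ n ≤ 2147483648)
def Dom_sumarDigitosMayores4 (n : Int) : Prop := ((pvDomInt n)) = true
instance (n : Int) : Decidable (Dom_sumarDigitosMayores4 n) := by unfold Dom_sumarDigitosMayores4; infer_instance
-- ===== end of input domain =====

-- B replaces A's digit recursion with an iterative accumulator loop (same guard, same error string); equivalence proved for n ≥ 0, where an Int is returned.


-- termination helper for both ports: n // 10 shrinks toNat for positive n
theorem pv_floordiv10_toNat_lt (n : Int) (h : 0 < n) :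
    (PySem.Int.floordiv n 10).toNat < n.toNat := by
  have : PySem.Int.floordiv n 10 = n / 10 := by
    simp [PySem.Int.floordiv, Int.fdiv_eq_ediv_of_nonneg n (by norm_num : (0:Int) ≤ 10)]
  rw [this]
  omega

-- ===== PORT A =====
-- A returns the Spanish error STRING for n < 0 (not an Int); those inputs are outside Pre_, the port returns 0 there.
def sumarDigitosMayores4 (n : Int) : Int :=
  if 0 ≤ n then
    if n = 0 then 0
    else
      if PySem.Int.mod n 10 > 4 then
        PySem.Int.mod n 10 + sumarDigitosMayores4 (PySem.Int.floordiv n 10)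
      else
        sumarDigitosMayores4 (PySem.Int.floordiv n 10)
  else 0
termination_by n.toNat
decreasing_by all_goals exact pv_floordiv10_toNat_lt n (by omega)

-- ===== PORT B =====
-- the while-loop of Source B: state (n, total)
def sumarDigitosMayores4AltLoop (n total : Int) : Int :=
  if 0 < n then
    sumarDigitosMayores4AltLoop (PySem.Int.floordiv n 10)
      (if PySem.Int.mod n 10 > 4 then total + PySem.Int.mod n 10 else total)
  else total
termination_by n.toNat
decreasing_by exact pv_floordiv10_toNat_lt n (by omega)

def sumarDigitosMayores4_alt (n : Int) : Int :=
  if 0 ≤ n then sumarDigitosMayores4AltLoop n 0 else 0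

-- ===== PRECONDITION & SPEC =====
-- Pre_ excludes n < 0: there the Python A returns the error string "Error: en número debe ser entero positivo", not an Int of the declared type (B returns the same string).
def Pre_sumarDigitosMayores4 (n : Int) : Prop := 0 ≤ n
instance (n : Int) : Decidable (Pre_sumarDigitosMayores4 n) := by unfold Pre_sumarDigitosMayores4; infer_instance
def pvWitness_sumarDigitosMayores4 : Int := 987

def Spec_sumarDigitosMayores4 (n : Int) (out : Int) : Prop := out = sumarDigitosMayores4_alt n
instance (n : Int) (out : Int) : Decidable (Spec_sumarDigitosMayores4 n out) := by unfold Spec_sumarDigitosMayores4; infer_instance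

-- ===== CLAIM (what is proved, stated in full; the proofs are below) =====
def Claim_equal_sumarDigitosMayores4 : Prop := ∀ (n : Int), Dom_sumarDigitosMayores4 n → Pre_sumarDigitosMayores4 n → Spec_sumarDigitosMayores4 n (sumarDigitosMayores4 n)

-- ===== LEMMAS AND PROOFS =====

-- loop invariant: the accumulator adds on top of A's recursive sum
theorem pv_loop_eq (k : Nat) : ∀ (n total : Int), 0 ≤ n → n.toNat ≤ k →
    sumarDigitosMayores4AltLoop n total = total + sumarDigitosMayores4 n := by
  induction k with
  | zero =>
    intro n total h0 hk
    have hn : n = 0 := by omega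
    subst hn
    rw [sumarDigitosMayores4AltLoop, sumarDigitosMayores4]
    norm_num
  | succ k ih =>
    intro n total h0 hk
    rw [sumarDigitosMayores4AltLoop, sumarDigitosMayores4]
    by_cases hz : n = 0
    · subst hz; norm_num
    · have hpos : 0 < n := by omega
      have hfd : PySem.Int.floordiv n 10 = n / 10 := by
        simp [PySem.Int.floordiv, Int.fdiv_eq_ediv_of_nonneg n (by norm_num : (0:Int) ≤ 10)]
      have hd0 : 0 ≤ PySem.Int.floordiv n 10 := by rw [hfd]; omega
      have hdk : (PySem.Int.floordiv n 10).toNat ≤ k := by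
        have := pv_floordiv10_toNat_lt n hpos
        omega
      simp only [hpos, if_pos, if_pos h0, if_neg hz]
      by_cases hm : PySem.Int.mod n 10 > 4
      · simp only [hm, if_pos, ih _ _ hd0 hdk]; ring
      · simp only [hm, if_false, ih _ _ hd0 hdk]

-- ===== VERDICT (by name: the statement is the Claim_ definition above) =====
theorem sumarDigitosMayores4_spec : Claim_equal_sumarDigitosMayores4 := by
  intro n _ hpre
  unfold Spec_sumarDigitosMayores4 sumarDigitosMayores4_alt
  have hpre' : (0:Int) ≤ n := hpre
  rw [if_pos hpre', pv_loop_eq n.toNat n 0 hpre' le_rfl]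
  ring
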